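-- pv_equiv track=rewrite | github.com/goronc/Projet-Enigma | vigenere.py | decoupe_sous_chaines
-- ===== SOURCE A (Python) =====
-- def decoupe_sous_chaines(chaine,long_cle):
--     """Cette fonction decoupe une chaine en plusieurs sous chaine en fonction du pas
--
--
--     Parameter
--     ---------
--     chaine  : str
--                 la chaine a decouper
--     long_cle : int
--                 la longeur de la cle
--
--     Returns
--     -------
--     list :
--         liste de chaine de caractere decouper
--
--
--     """
--     res = []                            # initialisation de res
--     for i in range(long_cle):           # parcours de la longueur de la cle
--         substring = [""]                # on crée la souschaine
--         for j in chaine[i::long_cle]:   # parcour de la chaine avec un decalage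
--             substring[0]+=j             # on ajoute la lettre
--         res.append(substring)           #on ajoute le tout a res
--     return res
-- ===== SOURCE B (Python) =====
-- def decoupe_sous_chaines(chaine, long_cle):
--     """Single forward pass: distribute each character into its bucket by index mod key length."""
--     if long_cle <= 0:
--         return []
--     buckets = [[""] for _ in range(long_cle)]
--     for idx, ch in enumerate(chaine):
--         buckets[idx % long_cle][0] += ch
--     return buckets
-- ===== Notes on version B (the rewrite author's own statement) =====
-- stated objective: alternative
-- what changed: Replaces A's long_cle strided slice scans over the string with one sequential pass distributing each character into buckets[idx % long_cle].
import Mathlib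
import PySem

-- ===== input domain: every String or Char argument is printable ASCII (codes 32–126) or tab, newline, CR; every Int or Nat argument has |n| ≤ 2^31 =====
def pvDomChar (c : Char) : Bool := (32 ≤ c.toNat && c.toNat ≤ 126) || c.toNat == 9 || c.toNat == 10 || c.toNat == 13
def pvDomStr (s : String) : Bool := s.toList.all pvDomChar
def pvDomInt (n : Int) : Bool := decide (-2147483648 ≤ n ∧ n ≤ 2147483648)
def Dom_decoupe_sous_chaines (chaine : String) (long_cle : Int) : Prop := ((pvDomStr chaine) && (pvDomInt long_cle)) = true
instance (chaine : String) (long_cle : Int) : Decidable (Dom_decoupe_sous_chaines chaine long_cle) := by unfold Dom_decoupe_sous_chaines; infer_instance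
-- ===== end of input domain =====

-- B replaces A's per-key strided slice scans by one sequential pass distributing each
-- character into buckets[idx % long_cle]; objective: alternative decomposition, same cost.


-- ===== PORT A =====
-- for i in range(long_cle): substring = [""]; for j in chaine[i::long_cle]: substring[0] += j; res.append(substring)
-- (slice? is always `some` inside the loop since the step long_cle ≥ 1 there; .getD [] only makes it total)
def decoupe_sous_chaines (chaine : String) (long_cle : Int) : List (List String) :=
  (PySem.List.pyRange 0 long_cle 1).foldl
    (fun res i =>
      let substring : List String := [""]
      let substring :=
        ((PySem.List.slice? chaine.toList (some i) none long_cle).getD []).foldl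
          (fun sub j => [String.ofList ((sub.headD "").toList ++ [j])]) substring
      res ++ [substring]) []

-- ===== PORT B =====
-- if long_cle <= 0: return []; buckets = [[""] for _ in range(long_cle)];
-- for idx, ch in enumerate(chaine): buckets[idx % long_cle][0] += ch; return buckets
def decoupe_sous_chaines_alt (chaine : String) (long_cle : Int) : List (List String) :=
  if long_cle ≤ 0 then []
  else
    let buckets : List (List String) := (List.range long_cle.toNat).map (fun _ => [""])
    (PySem.List.enumerate chaine.toList 0).foldl
      (fun bs p =>
        bs.modify (PySem.Int.mod p.1 long_cle).toNat
          (fun sub => [String.ofList ((sub.headD "").toList ++ [p.2])])) buckets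

-- ===== PRECONDITION & SPEC =====
def Spec_decoupe_sous_chaines (chaine : String) (long_cle : Int) (out : List (List String)) : Prop := out = decoupe_sous_chaines_alt chaine long_cle
instance (chaine : String) (long_cle : Int) (out : List (List String)) : Decidable (Spec_decoupe_sous_chaines chaine long_cle out) := by unfold Spec_decoupe_sous_chaines; infer_instance

-- ===== CLAIM (what is proved, stated in full; the proofs are below) =====
def Claim_equal_decoupe_sous_chaines : Prop := ∀ (chaine : String) (long_cle : Int), Dom_decoupe_sous_chaines chaine long_cle → Spec_decoupe_sous_chaines chaine long_cle (decoupe_sous_chaines chaine long_cle)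

-- ===== LEMMAS AND PROOFS =====

-- A's inner loop over a character list appends those characters to the single cell
lemma pvInnerA (cs pre : List Char) :
    cs.foldl (fun sub j => [String.ofList ((sub.headD "").toList ++ [j])])
      [String.ofList pre] = [String.ofList (pre ++ cs)] := by
  induction cs generalizing pre with
  | nil => simp
  | cons c cs ih => simpa using ih (pre ++ [c])

-- A as a map over range: bucket i is the strided slice, wrapped
lemma pvA_eq_map (chaine : String) (long_cle : Int) :
    decoupe_sous_chaines chaine long_cle
      = (PySem.List.pyRange 0 long_cle 1).map
          (fun i => [String.ofList ((PySem.List.slice? chaine.toList (some i) none long_cle).getD [])]) := by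
  unfold decoupe_sous_chaines
  have h : ∀ (res : List (List String)) (i : Int),
      (fun res i =>
        let substring : List String := [""]
        let substring :=
          ((PySem.List.slice? chaine.toList (some i) none long_cle).getD []).foldl
            (fun sub j => [String.ofList ((sub.headD "").toList ++ [j])]) substring
        res ++ [substring]) res i
      = res ++ [[String.ofList ((PySem.List.slice? chaine.toList (some i) none long_cle).getD [])]] := by
    intro res i
    show res ++ [_] = _
    rw [show ([""] : List String) = [String.ofList []] from rfl, pvInnerA]
    simp
  rw [funext fun res => funext fun i => h res i]
  exact PySem.List.foldl_append_singleton_eq_map _ _ []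

-- strided-slice snoc: appending one character extends exactly the bucket (length % L)
lemma pvSlice_snoc (xs : List Char) (c : Char) (i L : Int) (h0 : 0 ≤ i) (hiL : i < L) :
    (PySem.List.slice? (xs ++ [c]) (some i) none L).getD []
      = (PySem.List.slice? xs (some i) none L).getD []
        ++ (if (xs.length : Int) % L = i then [c] else []) := by
  have hL : 0 < L := lt_of_le_of_lt h0 hiL
  obtain ⟨iN, rfl⟩ := Int.eq_ofNat_of_zero_le h0
  obtain ⟨LN, rfl⟩ := Int.eq_ofNat_of_zero_le (le_of_lt hL)
  have hiLN : iN < LN := by exact_mod_cast hiL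
  have hLN : 0 < LN := by omega
  set n := xs.length with hn
  simp only [PySem.List.slice?, PySem.List.sliceIndices, if_neg (by omega : ¬ (LN:Int) = 0),
    if_neg (by omega : ¬ (LN:Int) < 0), if_pos (by exact_mod_cast hLN : (0:Int) < LN)]
  simp only [if_neg (by omega : ¬ (iN:Int) < 0), Option.getD_some, List.length_append,
    List.length_singleton]
  by_cases hin : iN < n
  · -- start is i on both sides
    rw [(by omega : min (iN:Int) ((n+1 : Nat):Int) = iN),
        (by omega : min (iN:Int) ((n:Nat):Int) = iN),
        if_pos (by omega : (iN:Int) < ((n+1:Nat):Int)),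
        if_pos (by omega : (iN:Int) < ((n:Nat):Int))]
    have hidx : ∀ k : Nat, ((iN:Int) + (LN:Int) * (k:Int)).toNat = iN + LN * k := by
      intro k; omega
    set m := n - iN with hm
    have hm1 : 1 ≤ m := by omega
    have hq : ((((n:Nat):Int) - iN + LN - 1) / LN).toNat = (m - 1) / LN + 1 := by
      rw [(by omega : ((n:Nat):Int) - iN + LN - 1 = ((m - 1 + LN : Nat):Int)),
          ← Int.natCast_div, Int.toNat_natCast, Nat.add_div_right _ hLN]
    have hq' : ((((n+1:Nat):Int) - iN + LN - 1) / LN).toNat = m / LN + 1 := by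
      rw [(by omega : ((n+1:Nat):Int) - iN + LN - 1 = ((m + LN : Nat):Int)),
          ← Int.natCast_div, Int.toNat_natCast, Nat.add_div_right _ hLN]
    rw [hq, hq']
    set q := (m - 1) / LN + 1 with hqdef
    have hbound : ∀ k < q, iN + LN * k < n := by
      intro k hk
      have h1 : LN * k ≤ LN * ((m-1)/LN) := Nat.mul_le_mul_left _ (by omega)
      have h2 : LN * ((m-1)/LN) ≤ m - 1 := Nat.mul_div_le _ _
      omega
    have hsame : ∀ k ∈ List.range q,
        (xs ++ [c])[((iN:Int) + (LN:Int) * (k:Int)).toNat]? = xs[((iN:Int) + (LN:Int) * (k:Int)).toNat]? := by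
      intro k hk
      rw [hidx k]
      exact List.getElem?_append_left (by simpa using hbound k (List.mem_range.mp hk))
    by_cases hdvd : LN ∣ m
    · -- bucket i gets the new char
      obtain ⟨t, ht⟩ := hdvd
      rcases t with _ | t'
      · omega
      have hmul : LN * (t' + 1) = LN * t' + LN := Nat.mul_succ _ _
      have hdivq : (m - 1) / LN = t' := by
        rw [(by omega : m - 1 = LN - 1 + LN * t'),
            Nat.add_mul_div_left _ _ hLN, Nat.div_eq_of_lt (by omega)]
        omega
      have hmodN : n % LN = iN := by
        rw [(by omega : n = iN + LN * (t' + 1)), Nat.add_mul_mod_self_left,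
            Nat.mod_eq_of_lt hiLN]
      have hmod : ((n:Nat):Int) % ((LN:Nat):Int) = ((iN:Nat):Int) := by
        rw [← Int.natCast_mod, hmodN]
      rw [if_pos hmod]
      have hqval : q = t' + 1 := by omega
      have hdm : m / LN = t' + 1 := by rw [ht, Nat.mul_div_cancel_left _ hLN]
      rw [(by omega : m / LN + 1 = q + 1), List.range_succ, List.filterMap_append,
          List.filterMap_congr hsame]
      congr 1
      have hiq : iN + LN * q = n := by rw [hqval]; omega
      simp only [List.filterMap_cons, List.filterMap_nil, hidx q, hiq]
      rw [List.getElem?_append_right (by omega)]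
      rw [show n - xs.length = 0 from by omega]
      rfl
    · -- no new char for this bucket
      have hmod : ¬ ((n:Nat):Int) % LN = iN := by
        intro h
        apply hdvd
        have hmodN : n % LN = iN := by
          have := h
          rw [← Int.natCast_mod] at this
          exact_mod_cast this
        have hdam := Nat.div_add_mod n LN
        exact ⟨n / LN, by omega⟩
      rw [if_neg hmod]
      have heq : m / LN = (m - 1) / LN := by
        have hs : (m - 1 + 1) / LN = (m - 1) / LN + if LN ∣ m - 1 + 1 then 1 else 0 :=
          Nat.succ_div
        rw [(by omega : m - 1 + 1 = m)] at hs
        simp [hdvd] at hs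
        omega
      rw [heq, List.append_nil]
      exact List.filterMap_congr hsame
  · -- old slice empty: start clamped to n
    rw [(by omega : min (iN:Int) ((n:Nat):Int) = ((n:Nat):Int)),
        if_neg (by omega : ¬ ((n:Nat):Int) < ((n:Nat):Int))]
    simp only [List.range_zero, List.filterMap_nil, List.nil_append]
    by_cases hieq : iN = n
    · rw [(by omega : min (iN:Int) ((n+1 : Nat):Int) = iN),
          if_pos (by omega : (iN:Int) < ((n+1:Nat):Int)),
          (by rw [(by omega : ((n+1:Nat):Int) - iN + LN - 1 = LN), Int.ediv_self (by omega)]; rfl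
            : ((((n+1:Nat):Int) - iN + LN - 1) / LN).toNat = 1)]
      have hmod : ((n:Nat):Int) % LN = iN := by
        rw [(by omega : ((n:Nat):Int) = (iN:Int))]
        exact Int.emod_eq_of_lt (by omega) (by omega)
      rw [if_pos hmod]
      simp only [List.range_one, List.filterMap_cons, List.filterMap_nil]
      rw [(by omega : ((iN:Int) + (LN:Int) * ((0:Nat):Int)).toNat = iN),
          List.getElem?_append_right (by omega)]
      rw [show iN - xs.length = 0 from by omega]
      rfl
    · have hgt : n + 1 ≤ iN := by omega
      rw [(by omega : min (iN:Int) ((n+1 : Nat):Int) = ((n+1:Nat):Int)),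
          if_neg (by omega : ¬ ((n+1:Nat):Int) < ((n+1:Nat):Int))]
      have hle : ((n:Nat):Int) % LN ≤ ((n:Nat):Int) := by
        rcases Int.lt_or_le ((n:Nat):Int) LN with hba | hba
        · rw [Int.emod_eq_of_lt (by omega) hba]
        · have h1 := Int.emod_lt_of_pos ((n:Nat):Int) (by omega : (0:Int) < LN)
          omega
      rw [if_neg (by omega : ¬ ((n:Nat):Int) % LN = (iN:Int))]
      simp

-- a strided slice of the empty string is empty
lemma pvSlice_nil (i L : Int) (h0 : 0 ≤ i) (hL : 0 < L) :
    (PySem.List.slice? ([] : List Char) (some i) none L).getD [] = [] := by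
  simp only [PySem.List.slice?, PySem.List.sliceIndices, if_neg (by omega : ¬ L = 0),
    if_neg (by omega : ¬ L < 0), if_pos hL, List.length_nil]
  simp only [if_neg (by omega : ¬ i < 0), Nat.cast_zero]
  rw [(by omega : min i (0:Int) = 0), if_neg (by omega : ¬ (0:Int) < 0)]
  simp

-- appending one character modifies exactly one bucket of A's map form
lemma pvMap_snoc (cs : List Char) (c : Char) (L : Int) (hL : 0 < L) :
    (PySem.List.pyRange 0 L 1).map
        (fun i => [String.ofList ((PySem.List.slice? (cs ++ [c]) (some i) none L).getD [])])
      = ((PySem.List.pyRange 0 L 1).map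
          (fun i => [String.ofList ((PySem.List.slice? cs (some i) none L).getD [])])).modify
          (PySem.Int.mod (cs.length : Int) L).toNat
          (fun sub => [String.ofList ((sub.headD "").toList ++ [c])]) := by
  have hmodE : PySem.Int.mod (cs.length : Int) L = (cs.length : Int) % L :=
    PySem.Int.mod_eq_emod_of_pos hL
  have hm0 : 0 ≤ (cs.length : Int) % L := Int.emod_nonneg _ (by omega)
  have hmL : (cs.length : Int) % L < L := Int.emod_lt_of_pos _ hL
  apply List.ext_getElem
  · simp
  · intro j hj1 hj2
    simp only [List.length_map, PySem.List.length_pyRange_one] at hj1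
    rw [List.getElem_modify]
    simp only [List.getElem_map, PySem.List.getElem_pyRange_one]
    have hjL : (j : Int) < L := by omega
    rw [(by omega : (0:Int) + (j:Int) = (j:Int)),
        pvSlice_snoc cs c (j:Int) L (by omega) hjL]
    by_cases hcase : ((cs.length : Int) % L) = (j : Int)
    · rw [if_pos (by omega : (PySem.Int.mod (cs.length : Int) L).toNat = j), if_pos hcase]
      simp
    · rw [if_neg (by omega : ¬ (PySem.Int.mod (cs.length : Int) L).toNat = j), if_neg hcase]
      simp

-- the heart: A's map-of-slices form equals B's single distribution pass
lemma pvMain (cs : List Char) (L : Int) (hL : 0 < L) :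
    (PySem.List.pyRange 0 L 1).map
        (fun i => [String.ofList ((PySem.List.slice? cs (some i) none L).getD [])])
      = (PySem.List.enumerate cs 0).foldl
          (fun bs p =>
            bs.modify (PySem.Int.mod p.1 L).toNat
              (fun sub => [String.ofList ((sub.headD "").toList ++ [p.2])]))
          ((List.range L.toNat).map (fun _ => [""])) := by
  induction cs using List.reverseRecOn with
  | nil =>
    simp only [PySem.List.enumerate_nil, List.foldl_nil]
    rw [PySem.List.pyRange_zero, List.map_map]
    apply List.map_congr_left
    intro k hk
    simp only [Function.comp_apply]
    rw [pvSlice_nil (k:Int) L (by omega) hL]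
  | append_singleton cs c ih =>
    rw [PySem.List.enumerate_append, List.foldl_append, ← ih,
        PySem.List.enumerate_cons, PySem.List.enumerate_nil, List.foldl_cons, List.foldl_nil,
        zero_add, pvMap_snoc cs c L hL]

theorem decoupe_sous_chaines_spec : Claim_equal_decoupe_sous_chaines := by
  intro chaine long_cle _hdom
  unfold Spec_decoupe_sous_chaines decoupe_sous_chaines_alt
  rw [pvA_eq_map]
  by_cases hL : long_cle ≤ 0
  · rw [if_pos hL, PySem.List.pyRange_one_eq_nil (by omega), List.map_nil]
  · rw [if_neg hL]
    exact pvMain chaine.toList long_cle (by omega)
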